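-- pv_equiv track=rewrite | github.com/vahekhechoyan/python-odyssey-homeworks | hw8.py | find_index_difference
-- ===== SOURCE A (Python) =====
-- def find_index_difference(array):
--     if len(array) == 0:
--         return None
--
--     min_index = 0
--     max_index = 0
--
--     for i in range(1, len(array)):
--         if array[i] < array[min_index]:
--             min_index = i
--         if array[i] > array[max_index]:
--             max_index = i
--
--     return abs(max_index - min_index)
-- ===== SOURCE B (Python) =====
-- def find_index_difference(array):
--     if len(array) == 0:
--         return None
--     return abs(array.index(max(array)) - array.index(min(array)))
-- ===== Notes on version B (the rewrite author's own statement) =====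
-- stated objective: idiomatic
-- what changed: Replaces the manual single-pass index-tracking loop with library scans: max/min pick the extreme values (first occurrence on ties) and list.index finds their first indices.
import Mathlib
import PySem

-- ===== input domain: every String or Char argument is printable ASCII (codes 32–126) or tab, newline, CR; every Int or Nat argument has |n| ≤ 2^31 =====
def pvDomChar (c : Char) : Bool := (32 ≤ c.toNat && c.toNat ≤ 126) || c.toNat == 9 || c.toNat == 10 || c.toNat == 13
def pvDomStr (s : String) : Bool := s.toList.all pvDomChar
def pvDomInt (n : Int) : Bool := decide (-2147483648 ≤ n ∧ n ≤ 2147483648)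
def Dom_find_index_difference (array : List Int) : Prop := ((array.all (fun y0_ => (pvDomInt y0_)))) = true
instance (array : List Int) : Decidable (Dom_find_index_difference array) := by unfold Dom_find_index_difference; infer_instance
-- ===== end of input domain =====

-- B replaces A's manual index-tracking loop with library max/min + first-index lookups (idiomatic; same O(n) cost).

-- ===== PORT A =====
-- the loop body: first the min_index update, then the max_index update, on state (min_index, max_index)
def pvStepMax (array : List Int) (s1 : Int × Int) (i : Int) : Int × Int :=
  if PySem.List.pyGetD array i 0 > PySem.List.pyGetD array s1.2 0 then (s1.1, i) else s1

def pvStep (array : List Int) (s : Int × Int) (i : Int) : Int × Int :=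
  pvStepMax array (if PySem.List.pyGetD array i 0 < PySem.List.pyGetD array s.1 0 then (i, s.2) else s) i

def find_index_difference (array : List Int) : Option Int :=
  if array.length = 0 then none
  else
    let st := (PySem.List.pyRange 1 (array.length : Int) 1).foldl (pvStep array) ((0 : Int), (0 : Int))
    some |st.2 - st.1|

-- ===== PORT B =====
def find_index_difference_alt (array : List Int) : Option Int :=
  if array.length = 0 then none
  else
    match PySem.List.max? array (fun x => x), PySem.List.min? array (fun x => x) with
    | some mx, some mn =>
      match PySem.List.index? array mx, PySem.List.index? array mn with
      | some imax, some imin => some |(imax : Int) - (imin : Int)|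
      | _, _ => none
    | _, _ => none

-- ===== PRECONDITION & SPEC =====
def Spec_find_index_difference (array : List Int) (out : Option Int) : Prop := out = find_index_difference_alt array
instance (array : List Int) (out : Option Int) : Decidable (Spec_find_index_difference array out) := by unfold Spec_find_index_difference; infer_instance

-- ===== CLAIM (what is proved, stated in full; the proofs are below) =====
def Claim_equal_find_index_difference : Prop := ∀ (array : List Int), Dom_find_index_difference array → Spec_find_index_difference array (find_index_difference array)

-- ===== LEMMAS AND PROOFS =====

theorem pv_idxOf?_of_mem {α : Type} [BEq α] [LawfulBEq α] (v : α) (xs : List α) (h : v ∈ xs) :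
    List.idxOf? v xs = some (List.idxOf v xs) := by
  induction xs with
  | nil => cases h
  | cons x t ih =>
    by_cases hx : x = v
    · subst hx
      simp [List.idxOf?_cons]
    · have hv : v ∈ t := by
        cases h with
        | head => exact absurd rfl hx
        | tail _ h' => exact h'
      simp [List.idxOf?_cons, hx, ih hv, beq_iff_eq]

-- the running loop of A, evaluated on any array extending the processed prefix x::t,
-- yields the first index of the minimum and of the maximum of x::t
theorem pv_loop (x : Int) (t tail : List Int) :
    (PySem.List.pyRange 1 (((x :: t).length : Int)) 1).foldl (pvStep ((x :: t) ++ tail)) ((0 : Int), (0 : Int))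
      = ((List.idxOf (t.foldl min x) (x :: t) : Int), (List.idxOf (t.foldl max x) (x :: t) : Int)) := by
  induction t using List.reverseRecOn generalizing tail with
  | nil =>
    simp [PySem.List.pyRange_one_eq_nil, List.idxOf]
  | append_singleton s z ih =>
    have hmn_mem : s.foldl min x ∈ x :: s := by
      have := PySem.List.min?_mem (xs := x :: s) (key := fun y => y) (m := s.foldl min x)
        (by rw [PySem.List.min?_id_cons])
      exact this
    have hmx_mem : s.foldl max x ∈ x :: s := by
      have := PySem.List.max?_mem (xs := x :: s) (key := fun y => y) (m := s.foldl max x)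
        (by rw [PySem.List.max?_id_cons])
      exact this
    have hmn_min : ∀ y ∈ x :: s, s.foldl min x ≤ y := by
      intro y hy
      exact PySem.List.min?_isMin (xs := x :: s) (key := fun y => y) (m := s.foldl min x)
        (by rw [PySem.List.min?_id_cons]) y hy
    have hmx_max : ∀ y ∈ x :: s, y ≤ s.foldl max x := by
      intro y hy
      exact PySem.List.max?_isMax (xs := x :: s) (key := fun y => y) (m := s.foldl max x)
        (by rw [PySem.List.max?_id_cons]) y hy
    have hmm : s.foldl min x ≤ s.foldl max x :=
      le_trans (hmn_min x (by simp)) (hmx_max x (by simp))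
    -- split the range at the last index
    have hlen : (((x :: (s ++ [z])).length : Nat) : Int) = ((x :: s).length : Int) + 1 := by
      simp
    have hrange : PySem.List.pyRange 1 (((x :: (s ++ [z])).length : Int)) 1
        = PySem.List.pyRange 1 ((x :: s).length : Int) 1 ++ [((x :: s).length : Int)] := by
      rw [hlen, PySem.List.pyRange_one_succ_right (by simp)]
    have harr : (x :: (s ++ [z])) ++ tail = (x :: s) ++ (z :: tail) := by simp
    rw [hrange, List.foldl_append, harr, ih (z :: tail)]
    -- evaluate the reads in the final step
    have hgetz : PySem.List.pyGetD ((x :: s) ++ (z :: tail)) (((x :: s).length : Nat) : Int) 0 = z := by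
      rw [PySem.List.pyGetD_natCast]
      simp [List.getD]
    have hget_at : ∀ v : Int, v ∈ x :: s →
        PySem.List.pyGetD ((x :: s) ++ (z :: tail)) ((List.idxOf v (x :: s) : Nat) : Int) 0 = v := by
      intro v hv
      rw [PySem.List.pyGetD_natCast]
      have hlt : List.idxOf v (x :: s) < (x :: s).length := List.idxOf_lt_length_of_mem hv
      have hlt2 : List.idxOf v (x :: s) < ((x :: s) ++ (z :: tail)).length := by
        simp only [List.length_append, List.length_cons]
        simp only [List.length_cons] at hlt
        omega
      rw [List.getD_eq_getElem _ _ hlt2]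
      rw [List.getElem_append_left hlt]
      exact List.getElem_idxOf hlt
    have hstep : pvStep ((x :: s) ++ (z :: tail))
        ((List.idxOf (s.foldl min x) (x :: s) : Int), (List.idxOf (s.foldl max x) (x :: s) : Int))
        (((x :: s).length : Nat) : Int)
        = ((List.idxOf ((s ++ [z]).foldl min x) (x :: (s ++ [z])) : Int),
           (List.idxOf ((s ++ [z]).foldl max x) (x :: (s ++ [z])) : Int)) := by
      unfold pvStep pvStepMax
      rw [hgetz, hget_at _ hmn_mem]
      have hfmin : (s ++ [z]).foldl min x = min (s.foldl min x) z := by simp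
      have hfmax : (s ++ [z]).foldl max x = max (s.foldl max x) z := by simp
      have hcons : (x :: (s ++ [z])) = (x :: s) ++ [z] := by simp
      by_cases h1 : z < s.foldl min x
      · rw [if_pos h1]
        dsimp only
        rw [hget_at _ hmx_mem]
        have h2 : ¬ z > s.foldl max x := by omega
        rw [if_neg h2]
        have hzmin : (s ++ [z]).foldl min x = z := by rw [hfmin]; omega
        have hzmax : (s ++ [z]).foldl max x = s.foldl max x := by rw [hfmax]; omega
        have hznotin : z ∉ x :: s := fun hz => absurd (hmn_min z hz) (by omega)
        have hidxmin : List.idxOf z (x :: (s ++ [z])) = (x :: s).length := by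
          rw [hcons, List.idxOf_append_of_notMem hznotin]
          simp
        have hidxmax : List.idxOf (s.foldl max x) (x :: (s ++ [z])) = List.idxOf (s.foldl max x) (x :: s) := by
          rw [hcons, List.idxOf_append_of_mem hmx_mem]
        rw [hzmin, hzmax, hidxmin, hidxmax]
      · rw [if_neg h1]
        dsimp only
        rw [hget_at _ hmx_mem]
        have hmin_keep : (s ++ [z]).foldl min x = s.foldl min x := by rw [hfmin]; omega
        have hidxmin : List.idxOf ((s ++ [z]).foldl min x) (x :: (s ++ [z]))
            = List.idxOf (s.foldl min x) (x :: s) := by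
          rw [hmin_keep, hcons, List.idxOf_append_of_mem hmn_mem]
        by_cases h2 : z > s.foldl max x
        · rw [if_pos h2]
          have hzmax : (s ++ [z]).foldl max x = z := by rw [hfmax]; omega
          have hznotin : z ∉ x :: s := fun hz => absurd (hmx_max z hz) (by omega)
          have hidxmax : List.idxOf z (x :: (s ++ [z])) = (x :: s).length := by
            rw [hcons, List.idxOf_append_of_notMem hznotin]
            simp
          rw [hidxmin, hzmax, hidxmax]
        · rw [if_neg h2]
          have hmax_keep : (s ++ [z]).foldl max x = s.foldl max x := by rw [hfmax]; omega
          have hidxmax : List.idxOf ((s ++ [z]).foldl max x) (x :: (s ++ [z]))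
              = List.idxOf (s.foldl max x) (x :: s) := by
            rw [hmax_keep, hcons, List.idxOf_append_of_mem hmx_mem]
          rw [hidxmin, hidxmax]
    simp only [List.foldl_cons, List.foldl_nil]
    rw [hstep]

-- ===== VERDICT (by name: the statement is the Claim_ definition above) =====
theorem find_index_difference_spec : Claim_equal_find_index_difference := by
  intro array _
  unfold Spec_find_index_difference
  cases array with
  | nil => rfl
  | cons x t =>
    have hmn_mem : t.foldl min x ∈ x :: t :=
      PySem.List.min?_mem (xs := x :: t) (key := fun y => y) (by rw [PySem.List.min?_id_cons])
    have hmx_mem : t.foldl max x ∈ x :: t :=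
      PySem.List.max?_mem (xs := x :: t) (key := fun y => y) (by rw [PySem.List.max?_id_cons])
    have hloop := pv_loop x t []
    rw [List.append_nil] at hloop
    unfold find_index_difference find_index_difference_alt
    rw [PySem.List.max?_id_cons, PySem.List.min?_id_cons]
    simp only [List.length_cons, Nat.succ_ne_zero, if_false, PySem.List.index?_eq_idxOf?,
      pv_idxOf?_of_mem _ _ hmx_mem, pv_idxOf?_of_mem _ _ hmn_mem]
    simp only [List.length_cons] at hloop
    rw [hloop]
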